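-- pv_equiv track=rewrite | github.com/tolgatorun/discretemath | graphs.py | indirectedDegree
-- ===== SOURCE A (Python) =====
-- def indirectedDegree(adjacentMatrix, matLen):
--     i = 0
--     degreeOfVertices = []
--     for x in range(matLen):
--         degreeOfVertices.append(0)
--
--     while i < matLen:
--         j = matLen-1
--         while j >= i:
--             if adjacentMatrix[i][j]>=1:
--                 degreeOfVertices[i] += adjacentMatrix[i][j]
--                 degreeOfVertices[j] += adjacentMatrix[i][j]
--             j-=1
--         i+=1
--     return degreeOfVertices
-- ===== SOURCE B (Python) =====
-- def indirectedDegree(adjacentMatrix, matLen):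
--     degreeOfVertices = []
--     for v in range(matLen):
--         d = 0
--         for j in range(v, matLen):
--             if adjacentMatrix[v][j] >= 1:
--                 d += adjacentMatrix[v][j]
--         for i in range(0, v + 1):
--             if adjacentMatrix[i][v] >= 1:
--                 d += adjacentMatrix[i][v]
--         degreeOfVertices.append(d)
--     return degreeOfVertices
-- ===== Notes on version B (the rewrite author's own statement) =====
-- stated objective: alternative
-- what changed: Replaces A's scatter over the upper triangle (each cell updating two accumulator slots in a pre-built list) by an independent per-vertex gather: degree[v] is computed on its own as the sum of the row suffix A[v][v..] plus the column prefix A[0..v][v], so no mutable degree list is maintained.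
import Mathlib
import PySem

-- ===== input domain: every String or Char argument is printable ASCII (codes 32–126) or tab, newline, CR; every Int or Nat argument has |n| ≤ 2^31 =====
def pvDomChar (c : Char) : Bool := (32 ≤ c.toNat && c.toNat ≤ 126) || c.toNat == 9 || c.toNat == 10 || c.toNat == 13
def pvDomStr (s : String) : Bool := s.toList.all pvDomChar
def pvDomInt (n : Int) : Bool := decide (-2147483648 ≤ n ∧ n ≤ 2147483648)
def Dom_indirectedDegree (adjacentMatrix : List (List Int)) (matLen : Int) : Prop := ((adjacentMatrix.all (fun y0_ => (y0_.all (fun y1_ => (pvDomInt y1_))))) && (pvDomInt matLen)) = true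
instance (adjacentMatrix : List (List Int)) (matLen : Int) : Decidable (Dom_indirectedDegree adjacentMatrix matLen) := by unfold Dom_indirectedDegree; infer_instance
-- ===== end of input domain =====

-- B replaces A's scatter (each upper-triangle cell updating two slots of a mutable degree list)
-- by an independent per-vertex gather (row suffix + column prefix), same O(n^2) cost: 'alternative'.

-- matrix read A[i][j] (both ports; always in range on Pre_)
def pvAt (m : List (List Int)) (i j : Int) : Int :=
  PySem.List.pyGetD (PySem.List.pyGetD m i []) j 0

-- ===== PORT A =====
def indirectedDegree (adjacentMatrix : List (List Int)) (matLen : Int) : List Int :=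
  let deg0 := (PySem.List.pyRange 0 matLen 1).foldl (fun acc _ => acc ++ [(0 : Int)]) []
  (PySem.List.pyRange 0 matLen 1).foldl (fun deg i =>
    (PySem.List.pyRange (matLen - 1) (i - 1) (-1)).foldl (fun deg j =>
      let a := pvAt adjacentMatrix i j
      if a ≥ 1 then
        let d1 := deg.set i.toNat (deg.getD i.toNat 0 + a)
        d1.set j.toNat (d1.getD j.toNat 0 + a)
      else deg) deg) deg0

-- ===== PORT B =====
def indirectedDegree_alt (adjacentMatrix : List (List Int)) (matLen : Int) : List Int :=
  (PySem.List.pyRange 0 matLen 1).foldl (fun acc v =>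
    let d : Int := (PySem.List.pyRange v matLen 1).foldl (fun d j =>
      let a := pvAt adjacentMatrix v j
      if a ≥ 1 then d + a else d) 0
    let d := (PySem.List.pyRange 0 (v + 1) 1).foldl (fun d i =>
      let a := pvAt adjacentMatrix i v
      if a ≥ 1 then d + a else d) d
    acc ++ [d]) []

-- ===== PRECONDITION & SPEC =====
-- Pre_ excludes exactly the inputs on which A raises IndexError: for 0 ≤ matLen it needs
-- matLen rows, each of length ≥ matLen (for matLen ≤ 0 it is vacuous; A returns []).
def Pre_indirectedDegree (adjacentMatrix : List (List Int)) (matLen : Int) : Prop :=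
  matLen ≤ (adjacentMatrix.length : Int) ∧
    ∀ row ∈ adjacentMatrix.take matLen.toNat, matLen ≤ (row.length : Int)
instance (adjacentMatrix : List (List Int)) (matLen : Int) : Decidable (Pre_indirectedDegree adjacentMatrix matLen) := by unfold Pre_indirectedDegree; infer_instance
def pvWitness_indirectedDegree : List (List Int) × Int := ([[0, 2], [1, 0]], 2)

def Spec_indirectedDegree (adjacentMatrix : List (List Int)) (matLen : Int) (out : List Int) : Prop := out = indirectedDegree_alt adjacentMatrix matLen
instance (adjacentMatrix : List (List Int)) (matLen : Int) (out : List Int) : Decidable (Spec_indirectedDegree adjacentMatrix matLen out) := by unfold Spec_indirectedDegree; infer_instance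

-- ===== CLAIM (what is proved, stated in full; the proofs are below) =====
def Claim_equal_indirectedDegree : Prop := ∀ (adjacentMatrix : List (List Int)) (matLen : Int), Dom_indirectedDegree adjacentMatrix matLen → Pre_indirectedDegree adjacentMatrix matLen → Spec_indirectedDegree adjacentMatrix matLen (indirectedDegree adjacentMatrix matLen)

-- ===== LEMMAS AND PROOFS =====

-- the contribution of cell (i,j): its value when ≥ 1, else 0
def pvF (m : List (List Int)) (i j : Int) : Int := if pvAt m i j ≥ 1 then pvAt m i j else 0
def pvUpd (m : List (List Int)) (i : Int) (deg : List Int) (j : Int) : List Int :=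
  let a := pvAt m i j
  if a ≥ 1 then
    let d1 := deg.set i.toNat (deg.getD i.toNat 0 + a)
    d1.set j.toNat (d1.getD j.toNat 0 + a)
  else deg
theorem pvUpd_getD (m : List (List Int)) (i j : Int) (deg : List Int) (v : Nat)
    (hi : 0 ≤ i) (hiL : i.toNat < deg.length) (hj : 0 ≤ j) (hjL : j.toNat < deg.length)
    (hv : v < deg.length) :
    (pvUpd m i deg j).getD v 0 =
      deg.getD v 0 + (if (v : Int) = i then pvF m i j else 0)
        + (if (v : Int) = j then pvF m i j else 0) := by
  have hvi : ((v : Int) = i) ↔ v = i.toNat := by omega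
  have hvj : ((v : Int) = j) ↔ v = j.toNat := by omega
  simp only [pvUpd, pvF]
  split
  case isTrue h =>
    simp only [List.getD_eq_getElem?_getD, List.getElem?_set, List.length_set]
    by_cases h1 : v = i.toNat <;> by_cases h2 : v = j.toNat <;>
      by_cases h3 : i.toNat = j.toNat <;>
      simp_all <;> split_ifs <;> simp_all
  case isFalse h => simp_all
theorem pvUpd_length (m : List (List Int)) (i : Int) (deg : List Int) (j : Int) :
    (pvUpd m i deg j).length = deg.length := by
  simp only [pvUpd]; split <;> simp

theorem pvInner_getD (m : List (List Int)) (i : Int) (js : List Int) (deg : List Int)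
    (hi : 0 ≤ i) (hiL : i.toNat < deg.length)
    (hjs : ∀ j ∈ js, 0 ≤ j ∧ j.toNat < deg.length)
    (hnd : js.Nodup) (v : Nat) (hv : v < deg.length) :
    (js.foldl (pvUpd m i) deg).getD v 0 =
      deg.getD v 0 + (if (v : Int) = i then (js.map (pvF m i)).sum else 0)
        + (if (v : Int) ∈ js then pvF m i (v : Int) else 0) := by
  induction js generalizing deg with
  | nil => simp
  | cons j rest ih =>
    obtain ⟨hj0, hjL⟩ := hjs j (List.mem_cons_self ..)
    have hlen : (pvUpd m i deg j).length = deg.length := pvUpd_length ..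
    rw [List.foldl_cons,
      ih (pvUpd m i deg j) (hlen ▸ hiL)
        (fun x hx => by have := hjs x (List.mem_cons_of_mem _ hx); omega)
        (List.nodup_cons.mp hnd).2 (hlen ▸ hv),
      pvUpd_getD m i j deg v hi hiL hj0 hjL hv]
    have hjrest : j ∉ rest := (List.nodup_cons.mp hnd).1
    by_cases hvj : (v : Int) = j
    · have hvrest : (v : Int) ∉ rest := by rw [hvj]; exact_mod_cast hjrest
      simp [hvj, hvrest]
      split <;> ring
    · rw [if_neg hvj]
      simp only [List.map_cons, List.sum_cons, List.mem_cons, hvj, false_or]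
      split <;> split <;> ring
theorem pvInner_length (m : List (List Int)) (i : Int) (js : List Int) (deg : List Int) :
    (js.foldl (pvUpd m i) deg).length = deg.length := by
  induction js generalizing deg with
  | nil => rfl
  | cons j rest ih => simp [List.foldl_cons, ih, pvUpd_length]

theorem pvRange_neg_nodup (a b : Int) : (PySem.List.pyRange a b (-1)).Nodup := by
  rw [PySem.List.pyRange_neg_one_eq_reverse]
  exact List.nodup_reverse.mpr (PySem.List.nodup_pyRange_one ..)

theorem pvOuter_getD (m : List (List Int)) (L : Int) (is : List Int) (deg : List Int)
    (his : ∀ i ∈ is, 0 ≤ i ∧ i.toNat < deg.length)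
    (hjall : ∀ i ∈ is, ∀ j ∈ PySem.List.pyRange (L - 1) (i - 1) (-1), 0 ≤ j ∧ j.toNat < deg.length)
    (v : Nat) (hv : v < deg.length) :
    (is.foldl (fun deg i =>
      (PySem.List.pyRange (L - 1) (i - 1) (-1)).foldl (pvUpd m i) deg) deg).getD v 0 =
      deg.getD v 0 + (is.map (fun i =>
        (if (v : Int) = i then ((PySem.List.pyRange (L - 1) (i - 1) (-1)).map (pvF m i)).sum else 0)
          + (if (v : Int) ∈ PySem.List.pyRange (L - 1) (i - 1) (-1) then pvF m i (v : Int) else 0))).sum := by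
  induction is generalizing deg with
  | nil => simp
  | cons i rest ih =>
    obtain ⟨hi0, hiL⟩ := his i (List.mem_cons_self ..)
    have hlen := pvInner_length m i (PySem.List.pyRange (L - 1) (i - 1) (-1)) deg
    rw [List.foldl_cons,
      ih _ (fun x hx => by have := his x (List.mem_cons_of_mem _ hx); omega)
        (fun x hx j hj => by
          have := hjall x (List.mem_cons_of_mem _ hx) j hj; omega) (hlen ▸ hv),
      pvInner_getD m i _ deg hi0 hiL (hjall i (List.mem_cons_self ..))
        (pvRange_neg_nodup ..) v hv]
    simp only [List.map_cons, List.sum_cons]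
    ring
theorem pvSum_map_ite_eq' (l : List Int) (hnd : l.Nodup) (v : Int) (hv : v ∈ l) (X : Int → Int) :
    (l.map (fun i => if v = i then X i else 0)).sum = X v := by
  induction l with
  | nil => cases hv
  | cons i rest ih =>
    rcases List.mem_cons.mp hv with h | h
    · subst h
      have : ∀ x ∈ rest, (if v = x then X x else 0) = 0 := by
        intro x hx
        have : v ≠ x := fun he => (List.nodup_cons.mp hnd).1 (he ▸ hx)
        simp [this]
      simp [List.map_congr_left this]
    · have hne : v ≠ i := fun he => (List.nodup_cons.mp hnd).1 (he ▸ h)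
      simp [hne, ih (List.nodup_cons.mp hnd).2 h]

theorem pvGetD_map_zero (l : List Int) (v : Nat) :
    (l.map (fun _ => (0 : Int))).getD v 0 = 0 := by
  rw [List.getD_eq_getElem?_getD, List.getElem?_map]
  cases l[v]? <;> simp

-- B in closed sum form
theorem pvB_eq_map (m : List (List Int)) (L : Int) :
    indirectedDegree_alt m L = (PySem.List.pyRange 0 L 1).map (fun v =>
      ((PySem.List.pyRange v L 1).map (fun j => pvF m v j)).sum
        + ((PySem.List.pyRange 0 (v + 1) 1).map (fun i => pvF m i v)).sum) := by
  unfold indirectedDegree_alt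
  rw [PySem.List.foldl_append_singleton_eq_map]
  simp only [List.nil_append]
  refine List.map_congr_left ?_
  intro v _
  have h1 : (PySem.List.pyRange v L 1).foldl
        (fun d j => if pvAt m v j ≥ 1 then d + pvAt m v j else d) 0
      = 0 + ((PySem.List.pyRange v L 1).map (fun j => pvF m v j)).sum := by
    rw [PySem.List.foldl_congr_mem' _ _ (fun d j => d + pvF m v j) _
        (by intro j _ d; simp only [pvF]; split <;> simp)]
    exact PySem.List.foldl_add ..
  have h2 : ∀ init : Int, (PySem.List.pyRange 0 (v + 1) 1).foldl
        (fun d i => if pvAt m i v ≥ 1 then d + pvAt m i v else d) init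
      = init + ((PySem.List.pyRange 0 (v + 1) 1).map (fun i => pvF m i v)).sum := by
    intro init
    rw [PySem.List.foldl_congr_mem' _ _ (fun d i => d + pvF m i v) _
        (by intro i _ d; simp only [pvF]; split <;> simp)]
    exact PySem.List.foldl_add ..
  rw [h1, h2]
  ring

theorem pvOuter_length (m : List (List Int)) (L : Int) (is : List Int) (deg : List Int) :
    (is.foldl (fun deg i =>
      (PySem.List.pyRange (L - 1) (i - 1) (-1)).foldl (pvUpd m i) deg) deg).length
      = deg.length := by
  induction is generalizing deg with
  | nil => rfl
  | cons i rest ih => simp [List.foldl_cons, ih, pvInner_length]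

theorem pvMain (m : List (List Int)) (L : Int) :
    indirectedDegree m L = indirectedDegree_alt m L := by
  have hdeg0 : ((PySem.List.pyRange 0 L 1).foldl (fun acc _ => acc ++ [(0 : Int)]) [])
      = (PySem.List.pyRange 0 L 1).map (fun _ => (0 : Int)) := by
    rw [PySem.List.foldl_append_singleton_eq_map]; simp
  have hlen0 : ((PySem.List.pyRange 0 L 1).map (fun _ => (0 : Int))).length = L.toNat := by
    simp [PySem.List.length_pyRange_one]
  rw [pvB_eq_map]
  have hA : indirectedDegree m L = (PySem.List.pyRange 0 L 1).foldl (fun deg i =>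
      (PySem.List.pyRange (L - 1) (i - 1) (-1)).foldl (pvUpd m i) deg)
      ((PySem.List.pyRange 0 L 1).map (fun _ => (0 : Int))) := by
    rw [← hdeg0]; rfl
  rw [hA]
  apply List.ext_getElem
  · rw [pvOuter_length, hlen0]
    simp [PySem.List.length_pyRange_one]
  intro v hv1 hv2
  rw [pvOuter_length, hlen0] at hv1
  have hL : 0 < L := by omega
  have hvL : (v : Int) < L := by omega
  -- RHS element
  rw [List.getElem_map, PySem.List.getElem_pyRange_one]
  -- LHS via getD
  rw [← List.getD_eq_getElem _ 0 (by rw [pvOuter_length, hlen0]; exact hv1)]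
  rw [pvOuter_getD m L _ _
      (fun i hi => by
        have := (PySem.List.mem_pyRange_one).mp hi
        constructor <;> omega)
      (fun i hi j hj => by
        have h1 := (PySem.List.mem_pyRange_one).mp hi
        have h2 := (PySem.List.mem_pyRange_neg_one).mp hj
        constructor <;> omega)
      v (by omega)]
  rw [pvGetD_map_zero]
  rw [PySem.List.sum_map_add_int]
  have hterm1 : ((PySem.List.pyRange 0 L 1).map (fun i =>
      if (v : Int) = i then ((PySem.List.pyRange (L - 1) (i - 1) (-1)).map (pvF m i)).sum else 0)).sum
      = ((PySem.List.pyRange (v : Int) L 1).map (fun j => pvF m (v : Int) j)).sum := by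
    rw [pvSum_map_ite_eq' _ (PySem.List.nodup_pyRange_one ..) _
        ((PySem.List.mem_pyRange_one).mpr ⟨by omega, hvL⟩)]
    rw [PySem.List.pyRange_neg_one_eq_reverse]
    have e1 : (v : Int) - 1 + 1 = (v : Int) := by ring
    have e2 : L - 1 + 1 = L := by ring
    rw [e1, e2, List.map_reverse, List.sum_reverse]
  have hterm2 : ((PySem.List.pyRange 0 L 1).map (fun i =>
      if (v : Int) ∈ PySem.List.pyRange (L - 1) (i - 1) (-1) then pvF m i (v : Int) else 0)).sum
      = ((PySem.List.pyRange 0 ((v : Int) + 1) 1).map (fun i => pvF m i (v : Int))).sum := by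
    rw [List.map_congr_left (l := PySem.List.pyRange 0 L 1)
        (g := fun i => if i ≤ (v : Int) then pvF m i (v : Int) else 0)
        (by
          intro i _
          have hmem : ((v : Int) ∈ PySem.List.pyRange (L - 1) (i - 1) (-1)) ↔ i ≤ (v : Int) := by
            rw [PySem.List.mem_pyRange_neg_one]; omega
          simp only [hmem])]
    rw [PySem.List.pyRange_one_append 0 ((v : Int) + 1) L (by omega) (by omega),
        List.map_append, List.sum_append]
    have c1 : ∀ i ∈ PySem.List.pyRange 0 ((v : Int) + 1) 1,
        (if i ≤ (v : Int) then pvF m i (v : Int) else 0) = pvF m i (v : Int) := by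
      intro i hi
      have := (PySem.List.mem_pyRange_one).mp hi
      rw [if_pos (by omega)]
    have c2 : ∀ i ∈ PySem.List.pyRange ((v : Int) + 1) L 1,
        (if i ≤ (v : Int) then pvF m i (v : Int) else 0) = 0 := by
      intro i hi
      have := (PySem.List.mem_pyRange_one).mp hi
      rw [if_neg (by omega)]
    rw [List.map_congr_left c1, List.map_congr_left c2]
    simp
  rw [hterm1, hterm2]
  simp

-- ===== VERDICT (by name: the statement is the Claim_ definition above) =====
theorem indirectedDegree_spec : Claim_equal_indirectedDegree := by
  intro m L _ _
  exact pvMain m L
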